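-- pv_equiv track=rewrite | github.com/jiajiabin/python_study | day01-10/day08/Homework/01_homework.py | question2_01
-- ===== SOURCE A (Python) =====
-- def question2_01(s: str):
--     ls = s.split(" ")
--     # "hello  world  good "
--     #['hello', '', 'word', '', 'good', '']
--     count = 0
--     for i in ls:
--         if i == "":
--             pass
--         else:
--             count += 1
--     return count
-- ===== SOURCE B (Python) =====
-- def question2_01(s: str):
--     count = 0
--     prev_was_space = True
--     for c in s:
--         if c != " " and prev_was_space:
--             count += 1
--         prev_was_space = (c == " ")
--     return count
-- ===== Notes on version B (the rewrite author's own statement) =====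
-- stated objective: faster
-- what changed: B counts transitions into non-space runs in a single character scan with a prev_was_space flag, instead of materialising the list s.split(" ") and counting its non-empty pieces.
import Mathlib
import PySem

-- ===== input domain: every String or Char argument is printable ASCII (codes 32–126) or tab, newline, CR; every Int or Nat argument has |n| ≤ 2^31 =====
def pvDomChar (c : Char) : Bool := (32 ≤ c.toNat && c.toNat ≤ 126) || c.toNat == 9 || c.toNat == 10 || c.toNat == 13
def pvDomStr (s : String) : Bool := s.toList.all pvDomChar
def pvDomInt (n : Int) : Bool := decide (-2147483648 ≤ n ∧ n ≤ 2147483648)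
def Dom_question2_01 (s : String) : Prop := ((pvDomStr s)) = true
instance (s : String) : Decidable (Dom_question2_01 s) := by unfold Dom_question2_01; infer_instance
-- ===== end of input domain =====

-- B replaces split-then-count by one character scan with a prev_was_space flag (objective: simpler, O(1) extra space).

-- ===== PORT A =====
def question2_01 (s : String) : Int :=
  let ls : List String := (PySem.Str.split? s " ").getD []   -- sep " " is nonempty, so split? is always `some`
  ls.foldl (fun count i => if i == "" then count else count + 1) 0

-- ===== PORT B =====
def question2_01_alt (s : String) : Int :=
  (s.toList.foldl
    (fun (st : Int × Bool) c =>
      (if c != ' ' && st.2 then st.1 + 1 else st.1, c == ' '))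
    (0, true)).1

-- ===== PRECONDITION & SPEC =====
def Spec_question2_01 (s : String) (out : Int) : Prop := out = question2_01_alt s
instance (s : String) (out : Int) : Decidable (Spec_question2_01 s out) := by unfold Spec_question2_01; infer_instance

-- ===== CLAIM (what is proved, stated in full; the proofs are below) =====
def Claim_equal_question2_01 : Prop := ∀ (s : String), Dom_question2_01 s → Spec_question2_01 s (question2_01 s)

-- ===== LEMMAS AND PROOFS =====

-- number of new non-space runs when scanning l, inword = currently inside a run
def pvCnt : Bool → List Char → Nat
  | _, [] => 0
  | inword, c :: t => if c = ' ' then pvCnt false t else (if inword then 0 else 1) + pvCnt true t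

-- number of nonempty pieces
def pvCN (l : List (List Char)) : Nat := l.countP (fun p => !p.isEmpty)

theorem pv_go_nil (fuel : Nat) (cur : List Char) (acc : List (List Char)) :
    PySem.Chars.splitOn.go [' '] fuel [] cur acc = (cur.reverse :: acc).reverse := by
  cases fuel <;> simp [PySem.Chars.splitOn.go]

theorem pv_go_space (fuel : Nat) (rest cur : List Char) (acc : List (List Char)) :
    PySem.Chars.splitOn.go [' '] (fuel+1) (' '::rest) cur acc
      = PySem.Chars.splitOn.go [' '] fuel rest [] (cur.reverse :: acc) := by
  simp [PySem.Chars.splitOn.go, List.isPrefixOf]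

theorem pv_go_char (fuel : Nat) (c : Char) (h : c ≠ ' ') (rest cur : List Char)
    (acc : List (List Char)) :
    PySem.Chars.splitOn.go [' '] (fuel+1) (c::rest) cur acc
      = PySem.Chars.splitOn.go [' '] fuel rest (c::cur) acc := by
  have h' : ¬ (' ' = c) := fun e => h e.symm
  simp [PySem.Chars.splitOn.go, List.isPrefixOf, h']

theorem pv_go_count (fuel : Nat) :
    ∀ (l cur : List Char) (acc : List (List Char)), l.length < fuel →
      pvCN (PySem.Chars.splitOn.go [' '] fuel l cur acc)
        = pvCN acc + (if cur.isEmpty then 0 else 1) + pvCnt (!cur.isEmpty) l := by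
  induction fuel with
  | zero => intro l cur acc h; omega
  | succ fuel ih =>
    intro l cur acc h
    cases l with
    | nil =>
      rw [pv_go_nil]
      cases cur <;> simp [pvCN, pvCnt, Nat.add_comm]
    | cons c rest =>
      by_cases hc : c = ' '
      · subst hc
        rw [pv_go_space fuel rest cur acc,
            ih rest [] (cur.reverse :: acc) (by simpa using Nat.lt_of_succ_lt_succ h)]
        cases cur <;> simp [pvCN, pvCnt]
      · rw [pv_go_char fuel c hc rest cur acc,
            ih rest (c::cur) acc (by simpa using Nat.lt_of_succ_lt_succ h)]
        cases cur <;> simp [pvCN, pvCnt, hc] <;> omega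

theorem pv_splitOn_count (l : List Char) :
    pvCN (PySem.Chars.splitOn l [' ']) = pvCnt false l := by
  unfold PySem.Chars.splitOn
  rw [pv_go_count (l.length + 1) l [] [] (Nat.lt_succ_self _)]
  simp [pvCN]

theorem pv_foldA (ps : List (List Char)) : ∀ (n : Int),
    ((ps.map String.ofList).foldl (fun count i => if i == "" then count else count + 1) n)
      = n + (pvCN ps : Int) := by
  induction ps with
  | nil => intro n; simp [pvCN]
  | cons p t ih =>
    intro n
    have he : (String.ofList p = "") ↔ p = [] := by
      constructor
      · intro h
        have := congrArg String.toList h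
        simpa using this
      · intro h; subst h; rfl
    simp only [List.map_cons, List.foldl_cons]
    by_cases hp : p = []
    · rw [if_pos (by simp [hp]), ih]
      simp [pvCN, hp]
    · rw [if_neg (by simp [he, hp]), ih]
      simp only [pvCN, List.countP_cons]
      have hpe : p.isEmpty = false := by simp [hp]
      simp [hpe]
      ring

theorem pv_foldB (l : List Char) : ∀ (n : Int) (prev : Bool),
    (l.foldl
      (fun (st : Int × Bool) c =>
        (if c != ' ' && st.2 then st.1 + 1 else st.1, c == ' '))
      (n, prev)).1 = n + (pvCnt (!prev) l : Int) := by
  induction l with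
  | nil => intro n prev; simp [pvCnt]
  | cons c t ih =>
    intro n prev
    simp only [List.foldl_cons]
    by_cases hc : c = ' '
    · subst hc
      have hst : ((if (' ' != ' ' && prev) = true then n + 1 else n, (' ' == ' '))) = ((n, true) : Int × Bool) := by
        simp
      rw [hst, ih]
      cases prev <;> simp [pvCnt]
    · have h1 : (c == ' ') = false := by simp [hc]
      cases prev with
      | false =>
        have hst : ((if (c != ' ' && false) = true then n + 1 else n, (c == ' '))) = ((n, false) : Int × Bool) := by
          simp [h1]
        rw [hst, ih]
        simp [pvCnt, hc]
      | true =>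
        have hst : ((if (c != ' ' && true) = true then n + 1 else n, (c == ' '))) = ((n + 1, false) : Int × Bool) := by
          simp [h1, hc]
        rw [hst, ih]
        simp [pvCnt, hc]
        ring

-- ===== VERDICT (by name: the statement is the Claim_ definition above) =====
theorem question2_01_spec : Claim_equal_question2_01 := by
  intro s _
  unfold Spec_question2_01 question2_01 question2_01_alt
  have h1 : (PySem.Str.split? s " ").getD []
      = (PySem.Chars.splitOn s.toList [' ']).map String.ofList := by
    simp [PySem.Str.split?, PySem.Chars.split?]
  rw [h1, pv_foldA, pv_foldB, pv_splitOn_count]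
  simp
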